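-- pv_equiv track=rewrite | github.com/brndngln/AIFOLIO_FINAL_V12 | autonomy/analytics/cross_niche_revenue_overlap_report.py | cross_niche_revenue_overlap
-- ===== SOURCE A (Python) =====
-- def cross_niche_revenue_overlap(niche_sales):
--     # Expects: dict of {'niche': set(vault_ids)}
--     overlap = {}
--     niches = list(niche_sales.keys())
--     for i, n1 in enumerate(niches):
--         for n2 in niches[i+1:]:
--             overlap_key = f"{n1} & {n2}"
--             overlap[overlap_key] = len(set(niche_sales[n1]) & set(niche_sales[n2]))
--     return {'cross_niche_overlap': overlap}
-- ===== SOURCE B (Python) =====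
-- def cross_niche_revenue_overlap(niche_sales):
--     # Inverted index (vault id -> niche positions) with pair counters, instead of
--     # rebuilding and intersecting a pair of sets for every pair of niches.
--     niches = list(niche_sales.keys())
--     index = {}  # vault id -> increasing list of niche positions whose id-set contains it
--     for i, n in enumerate(niches):
--         for v in dict.fromkeys(niche_sales[n]):
--             index.setdefault(v, []).append(i)
--     counts = {}  # (i, j) with i < j -> number of vault ids shared by niches i and j
--     for ids in index.values():
--         rest = ids
--         while rest:
--             i, rest = rest[0], rest[1:]
--             for j in rest:
--                 counts[(i, j)] = counts.get((i, j), 0) + 1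
--     n = len(niches)
--     overlap = {}
--     for i in range(n):
--         for j in range(i + 1, n):
--             overlap[f"{niches[i]} & {niches[j]}"] = counts.get((i, j), 0)
--     return {'cross_niche_overlap': overlap}
-- ===== Notes on version B (the rewrite author's own statement) =====
-- stated objective: alternative
-- what changed: Instead of rebuilding two sets and intersecting them for every one of the N^2/2 niche pairs, B deduplicates each vault list once, builds an inverted vault->niche-positions index in one pass, and turns each vault's position list into pair-counter increments, then emits the pair grid from the counter.
import Mathlib
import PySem

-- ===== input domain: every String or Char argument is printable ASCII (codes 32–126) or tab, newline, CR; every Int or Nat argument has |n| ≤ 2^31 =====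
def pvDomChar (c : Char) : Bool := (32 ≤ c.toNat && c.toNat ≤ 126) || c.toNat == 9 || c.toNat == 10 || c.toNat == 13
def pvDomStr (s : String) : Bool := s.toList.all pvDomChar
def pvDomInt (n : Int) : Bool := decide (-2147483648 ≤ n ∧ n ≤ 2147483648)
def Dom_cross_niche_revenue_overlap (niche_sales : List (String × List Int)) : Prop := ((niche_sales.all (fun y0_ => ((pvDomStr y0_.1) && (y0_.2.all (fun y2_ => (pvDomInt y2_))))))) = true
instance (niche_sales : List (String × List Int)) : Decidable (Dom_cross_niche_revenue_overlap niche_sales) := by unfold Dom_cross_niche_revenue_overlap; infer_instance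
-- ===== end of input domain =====

-- B replaces A's per-pair set building and intersection by a single inverted vault→niche-position
-- index whose per-vault position lists drive pair counters (a different algorithm of the same worst-case cost).

-- ===== PORT A =====
def cross_niche_revenue_overlap (niche_sales : List (String × List Int)) : List (String × List (String × Int)) :=
  let d := PySem.Dict.mk niche_sales
  let niches := d.keys
  let overlap := (PySem.List.enumerate niches 0).foldl (fun ov p =>
      (PySem.List.slice niches (some (p.1 + 1)) none).foldl (fun ov n2 =>
        PySem.Dict.insert ov (p.2 ++ " & " ++ n2)
          (PySem.Set.len (PySem.Set.inter
            (PySem.Set.ofList ((d.get? p.2).getD []))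
            (PySem.Set.ofList ((d.get? n2).getD []))))) ov)
    (PySem.Dict.mk [])
  [("cross_niche_overlap", overlap.items)]

-- ===== PORT B =====
-- while rest: i, rest = rest[0], rest[1:]; for j in rest: counts[(i,j)] = counts.get((i,j), 0) + 1
def pvPairsLoop (counts : PySem.Dict (Int × Int) Int) (rest : List Int) : PySem.Dict (Int × Int) Int :=
  match rest with
  | [] => counts
  | i :: rest =>
    pvPairsLoop (rest.foldl (fun c j => c.insert (i, j) (c.getD (i, j) 0 + 1)) counts) rest

-- index.setdefault(v, []).append(i) ≡ index[v] = index.get(v, []) + [i]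
def pvIdxStep (d : PySem.Dict String (List Int)) (idx : PySem.Dict Int (List Int)) (p : Int × String) : PySem.Dict Int (List Int) :=
  (PySem.List.dedup ((d.get? p.2).getD [])).foldl (fun idx v => idx.insert v (idx.getD v [] ++ [p.1])) idx

def cross_niche_revenue_overlap_alt (niche_sales : List (String × List Int)) : List (String × List (String × Int)) :=
  let d := PySem.Dict.mk niche_sales
  let niches := d.keys
  let index := (PySem.List.enumerate niches 0).foldl (pvIdxStep d) (PySem.Dict.mk [])
  let counts := index.values.foldl pvPairsLoop (PySem.Dict.mk [])
  let n : Int := PySem.List.len niches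
  let overlap := (PySem.List.pyRange 0 n 1).foldl (fun ov i =>
      (PySem.List.pyRange (i + 1) n 1).foldl (fun ov j =>
        PySem.Dict.insert ov (PySem.List.pyGetD niches i "" ++ " & " ++ PySem.List.pyGetD niches j "")
          (counts.getD (i, j) 0)) ov)
    (PySem.Dict.mk [])
  [("cross_niche_overlap", overlap.items)]

-- ===== PRECONDITION & SPEC =====
def Spec_cross_niche_revenue_overlap (niche_sales : List (String × List Int)) (out : List (String × List (String × Int))) : Prop := out = cross_niche_revenue_overlap_alt niche_sales
instance (niche_sales : List (String × List Int)) (out : List (String × List (String × Int))) : Decidable (Spec_cross_niche_revenue_overlap niche_sales out) := by unfold Spec_cross_niche_revenue_overlap; infer_instance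

-- ===== CLAIM (what is proved, stated in full; the proofs are below) =====
def Claim_equal_cross_niche_revenue_overlap : Prop := ∀ (niche_sales : List (String × List Int)), Dom_cross_niche_revenue_overlap niche_sales → Spec_cross_niche_revenue_overlap niche_sales (cross_niche_revenue_overlap niche_sales)

-- ===== LEMMAS AND PROOFS =====

-- Named (proof-side) forms of the two programs' pieces; A_eq/B_eq relate them to the ports by rfl.
def pvD (ns : List (String × List Int)) : PySem.Dict String (List Int) := PySem.Dict.mk ns
def pvN (ns : List (String × List Int)) : List String := (pvD ns).keys
def pvSv (ns : List (String × List Int)) (i : Int) : PySem.Set Int :=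
  PySem.Set.ofList (((pvD ns).get? (PySem.List.pyGetD (pvN ns) i "")).getD [])
def pvIndex (ns : List (String × List Int)) : PySem.Dict Int (List Int) :=
  (PySem.List.enumerate (pvN ns) 0).foldl (pvIdxStep (pvD ns)) (PySem.Dict.mk [])
def pvCounts (ns : List (String × List Int)) : PySem.Dict (Int × Int) Int :=
  (pvIndex ns).values.foldl pvPairsLoop (PySem.Dict.mk [])

-- ordered pairs (positions a < b) of a list, as B's while/for loop generates them
def pairsOf : List Int → List (Int × Int)
  | [] => []
  | i :: t => t.map (fun j => (i, j)) ++ pairsOf t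

-- the positions list the inverted index stores for vault v
def pvIds (ns : List (String × List Int)) (v : Int) : List Int :=
  ((PySem.List.enumerate (pvN ns) 0).filter
    (fun p => (PySem.List.dedup (((pvD ns).get? p.2).getD [])).contains v)).map (·.1)

theorem idxInner_getD_not_mem (s : List Int) (idx : PySem.Dict Int (List Int)) (i v : Int)
    (h : v ∉ s) :
    (s.foldl (fun idx w => idx.insert w (idx.getD w [] ++ [i])) idx).getD v []
      = idx.getD v [] := by
  induction s generalizing idx with
  | nil => rfl
  | cons x t ih =>
    simp only [List.foldl_cons]
    rw [ih _ (fun hm => h (List.mem_cons_of_mem _ hm)),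
        PySem.Dict.getD_insert_of_ne _ _ _ (fun he => h (by rw [he]; exact List.mem_cons_self))]

theorem idxInner_getD (s : List Int) (idx : PySem.Dict Int (List Int)) (i v : Int)
    (hs : s.Nodup) :
    (s.foldl (fun idx w => idx.insert w (idx.getD w [] ++ [i])) idx).getD v []
      = idx.getD v [] ++ (if v ∈ s then [i] else []) := by
  induction s generalizing idx with
  | nil => simp
  | cons x t ih =>
    simp only [List.foldl_cons]
    rcases List.nodup_cons.mp hs with ⟨hx, ht⟩
    by_cases hvx : v = x
    · subst hvx
      rw [idxInner_getD_not_mem _ _ _ _ hx, PySem.Dict.getD_insert_self]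
      simp
    · rw [ih _ ht, PySem.Dict.getD_insert_of_ne _ _ _ hvx]
      simp [List.mem_cons, hvx]
theorem idxFold_getD (d : PySem.Dict String (List Int)) (E : List (Int × String))
    (idx : PySem.Dict Int (List Int)) (v : Int) :
    (E.foldl (pvIdxStep d) idx).getD v []
      = idx.getD v [] ++ ((E.filter
          (fun p => (PySem.List.dedup ((d.get? p.2).getD [])).contains v)).map (·.1)) := by
  induction E generalizing idx with
  | nil => simp
  | cons p t ih =>
    simp only [List.foldl_cons, List.filter_cons]
    rw [ih, pvIdxStep, idxInner_getD _ _ _ _ (by rw [PySem.List.dedup_eq_ofList]; exact PySem.Set.nodup_ofList _)]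
    by_cases hv : v ∈ (d.get? p.2).getD []
    · simp [hv, List.contains_eq_mem]
    · simp [hv, List.contains_eq_mem]

theorem idxFold_keys_nodup (d : PySem.Dict String (List Int)) (E : List (Int × String))
    (idx : PySem.Dict Int (List Int)) (h : idx.keys.Nodup) :
    (E.foldl (pvIdxStep d) idx).keys.Nodup := by
  induction E generalizing idx with
  | nil => exact h
  | cons p t ih =>
    exact ih _ (PySem.Dict.nodup_keys_foldl_insert _ _ _ h)

theorem idxFold_keys_mem (d : PySem.Dict String (List Int)) (E : List (Int × String))
    (idx : PySem.Dict Int (List Int)) (v : Int) :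
    v ∈ (E.foldl (pvIdxStep d) idx).keys
      ↔ v ∈ idx.keys ∨ ∃ p ∈ E, v ∈ PySem.List.dedup ((d.get? p.2).getD []) := by
  induction E generalizing idx with
  | nil => simp
  | cons p t ih =>
    simp only [List.foldl_cons, ih, pvIdxStep, PySem.Dict.keys_foldl_insert,
      PySem.Set.mem_update, List.mem_cons]
    constructor
    · rintro (( h | h) | h)
      · exact Or.inl h
      · exact Or.inr ⟨p, Or.inl rfl, h⟩
      · rcases h with ⟨q, hq, hv⟩; exact Or.inr ⟨q, Or.inr hq, hv⟩
    · rintro (h | ⟨q, (rfl | hq), hv⟩)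
      · exact Or.inl (Or.inl h)
      · exact Or.inl (Or.inr hv)
      · exact Or.inr ⟨q, hq, hv⟩
theorem pvPairsLoop_eq (ids : List Int) (c : PySem.Dict (Int × Int) Int) :
    pvPairsLoop c ids = (pairsOf ids).foldl (fun c k => c.insert k (c.getD k 0 + 1)) c := by
  induction ids generalizing c with
  | nil => rfl
  | cons i t ih =>
    rw [pvPairsLoop, ih, pairsOf, List.foldl_append, List.foldl_map]

theorem countsFold_getD (vs : List (List Int)) (c : PySem.Dict (Int × Int) Int) (k : Int × Int) :
    (vs.foldl pvPairsLoop c).getD k 0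
      = c.getD k 0 + (vs.map (fun ids => ((pairsOf ids).count k : Int))).sum := by
  induction vs generalizing c with
  | nil => simp
  | cons ids t ih =>
    rw [List.foldl_cons, ih, pvPairsLoop_eq, PySem.Dict.getD_foldl_insert_add_one,
      List.map_cons, List.sum_cons]
    ring

theorem count_pairsOf (ids : List Int) (h : ids.Pairwise (· < ·)) (i j : Int) :
    (pairsOf ids).count (i, j) = if i ∈ ids ∧ j ∈ ids ∧ i < j then 1 else 0 := by
  induction ids with
  | nil => simp [pairsOf]
  | cons x t ih =>
    rcases List.pairwise_cons.mp h with ⟨hx, ht⟩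
    have hnd : t.Nodup := ht.imp ne_of_lt
    rw [pairsOf, List.count_append, ih ht]
    have hmap : (List.map (fun j => (x, j)) t).count (i, j)
        = if i = x then t.count j else 0 := by
      rw [List.count_eq_countP, List.countP_map]
      by_cases hix : i = x
      · subst hix
        rw [if_pos rfl, List.count_eq_countP]
        apply List.countP_congr
        intro y _
        simp [Function.comp, Prod.ext_iff]
      · simp only [hix, if_false]
        rw [List.countP_eq_length_filter]
        have : List.filter ((fun a => a == (i, j)) ∘ fun j => (x, j)) t = [] := by
          apply List.filter_eq_nil_iff.mpr
          intro y _
          simp [Function.comp, Prod.ext_iff]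
          intro hxi; exact fun _ => hix hxi.symm
        rw [this]; rfl
    rw [hmap]
    by_cases hix : i = x
    · subst hix
      have hit : i ∉ t := fun hm => lt_irrefl i (hx i hm)
      by_cases hjt : j ∈ t
      · have : i < j := hx j hjt
        rw [List.count_eq_one_of_mem hnd hjt]
        simp [hit, hjt, this]
      · rw [List.count_eq_zero_of_not_mem hjt]
        by_cases hji : j = i
        · subst hji; simp [hit]
        · simp [hit, hjt, fun (hh : j = i) => hji hh]
    · simp only [hix, if_false, Nat.zero_add]
      by_cases hit : i ∈ t
      · by_cases hjt : j ∈ t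
        · simp [List.mem_cons, hit, hjt, hix]
        · by_cases hjx : j = x
          · subst hjx
            have hij : ¬ i < j := fun hlt => absurd (hx i hit) (lt_asymm hlt)
            simp [List.mem_cons, hit, hjt, hij]
          · simp [List.mem_cons, hit, hjt, hjx, hix]
      · simp [List.mem_cons, hit, hix]
theorem pvIds_pairwise (ns : List (String × List Int)) (v : Int) :
    (pvIds ns v).Pairwise (· < ·) := by
  rw [pvIds, List.pairwise_map]
  exact List.Pairwise.filter _ (PySem.List.pairwise_lt_enumerate _ _)

theorem pvIds_mem (ns : List (String × List Int)) (v i : Int)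
    (h0 : 0 ≤ i) (h1 : i < (pvN ns).length) :
    i ∈ pvIds ns v ↔ v ∈ pvSv ns i := by
  rw [pvIds, List.mem_map]
  constructor
  · rintro ⟨p, hp, rfl⟩
    rcases List.mem_filter.mp hp with ⟨hpE, hc⟩
    rcases (PySem.List.mem_enumerate_iff _ _ _).mp hpE with ⟨k, hk, rfl⟩
    simp only [List.contains_eq_mem, PySem.List.mem_dedup, decide_eq_true_eq] at hc
    rw [pvSv, PySem.Set.mem_ofList,
      PySem.List.pyGetD_eq_getElem _ _ (by simp) (by simp; omega)]
    simpa using hc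
  · intro hv
    refine ⟨(i, (pvN ns)[i.toNat]), List.mem_filter.mpr ⟨?_, ?_⟩, rfl⟩
    · rw [PySem.List.mem_enumerate_iff]
      refine ⟨i.toNat, by omega, by simp [Int.toNat_of_nonneg h0]⟩
    · simp only [List.contains_eq_mem, PySem.List.mem_dedup, decide_eq_true_eq]
      rw [pvSv, PySem.Set.mem_ofList, PySem.List.pyGetD_eq_getElem _ _ h0 (by exact_mod_cast h1)] at hv
      exact hv

theorem pvIndex_getD (ns : List (String × List Int)) (v : Int) :
    (pvIndex ns).getD v [] = pvIds ns v := by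
  rw [pvIndex, idxFold_getD]
  rfl

theorem pvSv_subset_keys (ns : List (String × List Int)) (i v : Int)
    (h0 : 0 ≤ i) (h1 : i < (pvN ns).length) (hv : v ∈ pvSv ns i) :
    v ∈ (pvIndex ns).keys := by
  rw [pvIndex, idxFold_keys_mem]
  right
  refine ⟨(i, (pvN ns)[i.toNat]), ?_, ?_⟩
  · rw [PySem.List.mem_enumerate_iff]
    exact ⟨i.toNat, by omega, by simp [Int.toNat_of_nonneg h0]⟩
  · rw [PySem.List.dedup_eq_ofList, PySem.Set.mem_ofList]
    rw [pvSv, PySem.Set.mem_ofList, PySem.List.pyGetD_eq_getElem _ _ h0 (by exact_mod_cast h1)] at hv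
    exact hv
theorem pvCounts_getD (ns : List (String × List Int)) (i j : Int)
    (h0 : 0 ≤ i) (hij : i < j) (h1 : j < (pvN ns).length) :
    (pvCounts ns).getD (i, j) 0
      = PySem.Set.len (PySem.Set.inter (pvSv ns i) (pvSv ns j)) := by
  have hiN : i < ((pvN ns).length : Int) := lt_trans hij h1
  have hj0 : (0:Int) ≤ j := le_of_lt (lt_of_le_of_lt h0 hij)
  have hnd : (pvIndex ns).keys.Nodup :=
    idxFold_keys_nodup _ _ _ (by exact List.nodup_nil)
  rw [pvCounts, countsFold_getD, PySem.Dict.values_eq_map_keys _ hnd [], List.map_map]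
  have hgd0 : (PySem.Dict.mk ([] : List ((Int × Int) × Int))).getD (i, j) 0 = 0 := rfl
  rw [hgd0, zero_add]
  rw [List.map_congr_left (g := fun v =>
      if ((pvSv ns i).contains v && (pvSv ns j).contains v) = true then (1:Int) else 0)
      (fun v _ => by
        simp only [Function.comp_apply]
        rw [pvIndex_getD, count_pairsOf _ (pvIds_pairwise ns v) i j]
        simp only [pvIds_mem ns v i h0 (by exact_mod_cast hiN),
          pvIds_mem ns v j hj0 (by exact_mod_cast h1)]
        by_cases hvi : v ∈ pvSv ns i <;> by_cases hvj : v ∈ pvSv ns j <;>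
          simp [hvi, hvj, hij])]
  rw [PySem.List.sum_map_ite_one_zero]
  have : PySem.Set.len (PySem.Set.inter (pvSv ns i) (pvSv ns j))
      = (((pvSv ns i).filter (fun v => (pvSv ns j).contains v)).length : Int) := rfl
  rw [this, ← List.countP_eq_length_filter, Nat.cast_inj.mpr ?_]
  rw [List.countP_eq_length_filter, List.countP_eq_length_filter]
  apply List.Perm.length_eq
  apply (List.perm_ext_iff_of_nodup (hnd.filter _) ((PySem.Set.nodup_ofList _).filter _)).mpr
  intro v
  simp only [List.mem_filter, Bool.and_eq_true, PySem.Set.contains_iff]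
  rw [show PySem.Set.ofList (((pvD ns).get? (PySem.List.pyGetD (pvN ns) i "")).getD []) = pvSv ns i from rfl]
  constructor
  · rintro ⟨-, hvi, hvj⟩; exact ⟨hvi, hvj⟩
  · rintro ⟨hvi, hvj⟩
    exact ⟨pvSv_subset_keys ns i v h0 (by exact_mod_cast hiN) hvi, hvi, hvj⟩

def pvOverlapA (ns : List (String × List Int)) : PySem.Dict String Int :=
  (PySem.List.enumerate (pvN ns) 0).foldl (fun ov p =>
      (PySem.List.slice (pvN ns) (some (p.1 + 1)) none).foldl (fun ov n2 =>
        PySem.Dict.insert ov (p.2 ++ " & " ++ n2)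
          (PySem.Set.len (PySem.Set.inter
            (PySem.Set.ofList (((pvD ns).get? p.2).getD []))
            (PySem.Set.ofList (((pvD ns).get? n2).getD []))))) ov)
    (PySem.Dict.mk [])

def pvOverlapB (ns : List (String × List Int)) : PySem.Dict String Int :=
  (PySem.List.pyRange 0 (PySem.List.len (pvN ns)) 1).foldl (fun ov i =>
      (PySem.List.pyRange (i + 1) (PySem.List.len (pvN ns)) 1).foldl (fun ov j =>
        PySem.Dict.insert ov (PySem.List.pyGetD (pvN ns) i "" ++ " & " ++ PySem.List.pyGetD (pvN ns) j "")
          ((pvCounts ns).getD (i, j) 0)) ov)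
    (PySem.Dict.mk [])

theorem drop_eq_map_pyRange (xs : List String) (a : Int) (h0 : 0 ≤ a) (h1 : a ≤ xs.length) :
    xs.drop a.toNat
      = (PySem.List.pyRange a (PySem.List.len xs) 1).map (fun j => PySem.List.pyGetD xs j "") := by
  conv_lhs => rw [← PySem.List.map_pyGetD_pyRange_zero xs ""]
  rw [PySem.List.pyRange_one_append 0 a (PySem.List.len xs) h0 (by simp [PySem.List.len]; omega),
      List.map_append]
  have hlen : ((PySem.List.pyRange 0 a 1).map (fun j => PySem.List.pyGetD xs j "")).length = a.toNat := by
    simp [PySem.List.length_pyRange_one]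
  rw [← hlen, List.drop_left]

theorem overlap_eq (ns : List (String × List Int)) : pvOverlapA ns = pvOverlapB ns := by
  rw [pvOverlapA, pvOverlapB, PySem.List.enumerate_eq_map_pyRange (pvN ns) "", List.foldl_map]
  apply PySem.List.foldl_congr_mem
  intro ov i hi
  rcases PySem.List.mem_pyRange_one.mp hi with ⟨hi0, hiN⟩
  simp only [PySem.List.len] at hiN ⊢
  rw [PySem.List.slice_from _ (by omega),
      drop_eq_map_pyRange _ _ (by omega) (by omega), List.foldl_map]
  simp only [PySem.List.len]
  apply PySem.List.foldl_congr_mem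
  intro ov2 j hj
  rcases PySem.List.mem_pyRange_one.mp hj with ⟨hj1, hjN⟩
  rw [pvCounts_getD ns i j hi0 (by omega) (by omega)]
  rfl

theorem A_eq (ns : List (String × List Int)) :
    cross_niche_revenue_overlap ns = [("cross_niche_overlap", (pvOverlapA ns).items)] := rfl

theorem B_eq (ns : List (String × List Int)) :
    cross_niche_revenue_overlap_alt ns = [("cross_niche_overlap", (pvOverlapB ns).items)] := rfl

-- ===== VERDICT (by name: the statement is the Claim_ definition above) =====
theorem cross_niche_revenue_overlap_spec : Claim_equal_cross_niche_revenue_overlap := by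
  intro ns _
  show cross_niche_revenue_overlap ns = cross_niche_revenue_overlap_alt ns
  rw [A_eq, B_eq, overlap_eq]
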